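-- pv_equiv track=rewrite | github.com/gahogg/leetcode-answers | Lucky Numbers in a Matrix.py | _get_minimum_in_row_mat
-- ===== SOURCE A (Python) =====
-- def _get_minimum_in_row_mat(matrix):
--     m, n = len(matrix), len(matrix[0])
--     is_minimum_in_row_mat = [[0] * n for i in range(m)]
--
--     for i in range(m):
--         min_j = 0
--         for j in range(n):
--             if matrix[i][j] < matrix[i][min_j]:
--                 min_j = j
--         is_minimum_in_row_mat[i][min_j] = 1
--     return is_minimum_in_row_mat
-- ===== SOURCE B (Python) =====
-- def _get_minimum_in_row_mat(matrix):
--     m, n = len(matrix), len(matrix[0])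
--     res = []
--     for i in range(m):
--         row = matrix[i]
--         order = sorted(range(n), key=lambda k: row[k])
--         j = order[0]
--         res.append([int(k == j) for k in range(n)])
--     return res
-- ===== Notes on version B (the rewrite author's own statement) =====
-- stated objective: alternative
-- what changed: Replaces A's running-argmin scan into a preallocated zero matrix by a sort-based algorithm: for each row it stably sorts the column indices by their value and takes the head (stability gives A's first-minimum tie rule), building each output row by comprehension.
import Mathlib
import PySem

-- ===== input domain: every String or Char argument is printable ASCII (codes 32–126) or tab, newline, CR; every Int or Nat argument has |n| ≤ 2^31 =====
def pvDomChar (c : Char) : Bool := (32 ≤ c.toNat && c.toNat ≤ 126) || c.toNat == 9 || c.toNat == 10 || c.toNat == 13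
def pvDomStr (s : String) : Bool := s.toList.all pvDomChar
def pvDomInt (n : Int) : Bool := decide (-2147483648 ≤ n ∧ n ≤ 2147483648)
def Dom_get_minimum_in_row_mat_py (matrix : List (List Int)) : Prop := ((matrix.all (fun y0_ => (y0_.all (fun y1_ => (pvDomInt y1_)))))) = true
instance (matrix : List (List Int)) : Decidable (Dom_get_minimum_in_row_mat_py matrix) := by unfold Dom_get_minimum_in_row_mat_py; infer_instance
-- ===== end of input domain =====

-- B replaces A's running-argmin scan into a preallocated zero matrix by a sort-based
-- algorithm: per row, stably sort the column indices by value and take the head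
-- (stability reproduces A's strict-< first-minimum tie rule) — objective: alternative.

-- ===== PORT A =====
-- literal port of A: zero matrix first, then for each row a running-argmin loop and one in-place set
def get_minimum_in_row_mat_py (matrix : List (List Int)) : List (List Int) :=
  let m := matrix.length
  let n := (PySem.List.pyGetD matrix 0 []).length
  let init := (List.range m).map (fun _ => List.replicate n (0 : Int))
  (List.range m).foldl (fun acc (i : Nat) =>
    let row := PySem.List.pyGetD matrix (i : Int) []
    let min_j := (List.range n).foldl (fun (mj : Nat) (j : Nat) =>
      if PySem.List.pyGetD row (j : Int) 0 < PySem.List.pyGetD row (mj : Int) 0 then j else mj) 0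
    acc.set i ((acc.getD i []).set min_j 1)) init

-- ===== PORT B =====
-- literal port of B: per row, stable-sort the indices range(n) by value, take order[0],
-- build the 0/1 row by comprehension, append.  order[0] is pyGet?; its '.getD 0' is only
-- reached when order = [] (n = 0), where the Python raises — excluded by Pre_ below.
def get_minimum_in_row_mat_py_alt (matrix : List (List Int)) : List (List Int) :=
  let m := matrix.length
  let n := (PySem.List.pyGetD matrix 0 []).length
  (List.range m).foldl (fun res (i : Nat) =>
    let row := PySem.List.pyGetD matrix (i : Int) []
    let order := PySem.List.sorted (List.range n) (fun k => PySem.List.pyGetD row (k : Int) 0)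
    let j := (PySem.List.pyGet? order (0 : Int)).getD 0
    res ++ [(List.range n).map (fun k => if k = j then (1 : Int) else 0)]) []

-- ===== PRECONDITION & SPEC =====
-- Pre_ excludes exactly the inputs on which the Python A raises IndexError: the empty matrix,
-- an empty first row (the set at column min_j=0 is out of range), and rows shorter than the first.
def Pre_get_minimum_in_row_mat_py (matrix : List (List Int)) : Prop :=
  matrix ≠ [] ∧ 1 ≤ (matrix.headD []).length ∧
    ∀ row ∈ matrix, (matrix.headD []).length ≤ row.length
instance (matrix : List (List Int)) : Decidable (Pre_get_minimum_in_row_mat_py matrix) := by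
  unfold Pre_get_minimum_in_row_mat_py; infer_instance
def pvWitness_get_minimum_in_row_mat_py : List (List Int) := [[3, 1, 2], [2, 2, 5], [7, 0, 0]]
def Spec_get_minimum_in_row_mat_py (matrix : List (List Int)) (out : List (List Int)) : Prop :=
  out = get_minimum_in_row_mat_py_alt matrix
instance (matrix : List (List Int)) (out : List (List Int)) :
    Decidable (Spec_get_minimum_in_row_mat_py matrix out) := by
  unfold Spec_get_minimum_in_row_mat_py; infer_instance

-- ===== CLAIM (what is proved, stated in full; the proofs are below) =====
def Claim_equal_get_minimum_in_row_mat_py : Prop :=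
  ∀ (matrix : List (List Int)), Dom_get_minimum_in_row_mat_py matrix →
    Pre_get_minimum_in_row_mat_py matrix →
    Spec_get_minimum_in_row_mat_py matrix (get_minimum_in_row_mat_py matrix)

-- ===== LEMMAS AND PROOFS =====

-- A's inner running-argmin loop, abstracted
def pvArgmin (row : List Int) (n : Nat) : Nat :=
  (List.range n).foldl (fun (mj : Nat) (j : Nat) =>
    if PySem.List.pyGetD row (j : Int) 0 < PySem.List.pyGetD row (mj : Int) 0 then j else mj) 0

-- the running argmin stays in range
theorem pvArgmin_lt (row : List Int) (n : Nat) (hn : 1 ≤ n) : pvArgmin row n < n := by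
  induction n with
  | zero => omega
  | succ k ih =>
    have hstep : pvArgmin row (k + 1) =
        if PySem.List.pyGetD row (k : Int) 0 < PySem.List.pyGetD row (pvArgmin row k : Int) 0
        then k else pvArgmin row k := by
      simp [pvArgmin, List.range_succ]
    rw [hstep]
    by_cases hk : 1 ≤ k
    · have := ih hk; split_ifs <;> omega
    · have hk0 : k = 0 := by omega
      subst hk0
      have : pvArgmin row 0 = 0 := rfl
      split_ifs <;> omega

-- insertBy on a nonempty list: the head is the strict-< minimum of the two heads
theorem pvInsertBy_cons (key : Nat → Int) (x h : Nat) (t : List Nat) :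
    PySem.List.insertBy (fun a b => decide (key a < key b)) x (h :: t) =
      if key x < key h then x :: h :: t
      else h :: PySem.List.insertBy (fun a b => decide (key a < key b)) x t := by
  simp [PySem.List.insertBy]

-- head of the insertion-sort fold = A's running strict-< argmin recurrence
theorem pvFoldInsertBy_headD (key : Nat → Int) :
    ∀ (l : List Nat) (h : Nat) (t : List Nat),
      ((l.foldl (fun acc x =>
          PySem.List.insertBy (fun a b => decide (key a < key b)) x acc) (h :: t))).headD 0
        = l.foldl (fun mj j => if key j < key mj then j else mj) h := by
  intro l
  induction l with
  | nil => intro h t; simp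
  | cons x l ih =>
    intro h t
    simp only [List.foldl_cons]
    rw [pvInsertBy_cons]
    split_ifs with hx
    · exact ih x (h :: t)
    · cases hcase : PySem.List.insertBy (fun a b => decide (key a < key b)) x t with
      | nil =>
        exfalso
        have : x ∈ ([] : List Nat) := by
          rw [← hcase]; exact (PySem.List.mem_insertBy _ _ _ _).mpr (Or.inl rfl)
        simp at this
      | cons h' t' =>
        exact ih h (h' :: t')

-- head of the stable sort of range (k+1) by key = A's running argmin over range (k+1)
theorem pvSortedRange_headD (key : Nat → Int) (k : Nat) :
    (PySem.List.sorted (List.range (k + 1)) key).headD 0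
      = (List.range (k + 1)).foldl (fun mj j => if key j < key mj then j else mj) 0 := by
  rw [PySem.List.sorted_eq_foldl_insertBy, List.range_succ_eq_map]
  simp only [List.foldl_cons]
  have h0 : PySem.List.insertBy (fun a b => decide (key a < key b)) 0 ([] : List Nat) = [0] := by
    simp [PySem.List.insertBy]
  rw [h0, pvFoldInsertBy_headD key _ 0 []]
  have : (if key 0 < key 0 then 0 else 0) = 0 := by simp
  rw [this]

-- a nonempty sorted list: pyGet? at 0 then getD is the head
theorem pvPyGetZero (l : List Nat) (hl : l ≠ []) :
    (PySem.List.pyGet? l (0 : Int)).getD 0 = l.headD 0 := by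
  cases l with
  | nil => exact absurd rfl hl
  | cons a t => simp [PySem.List.pyGet?, PySem.List.pyIdx?]

-- [0]*n with position j set to 1 is the 0/1 comprehension over range n
theorem pvReplicateSet (n j : Nat) (_hj : j < n) :
    (List.replicate n (0 : Int)).set j 1 =
      (List.range n).map (fun k => if k = j then (1 : Int) else 0) := by
  apply List.ext_getElem
  · simp
  · intro i h1 h2
    simp only [List.getElem_set, List.getElem_map, List.getElem_range, List.getElem_replicate]
    by_cases h : i = j
    · simp [h]
    · simp [h]; omega

-- the outer loop only sets row i once, from its still-zero value: the fold IS a map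
theorem pvFoldSet (m : Nat) (z : List Int) (f : Nat → Nat) :
    ∀ k, k ≤ m →
      (List.range k).foldl (fun acc (i : Nat) => acc.set i ((acc.getD i []).set (f i) 1))
          ((List.range m).map (fun _ => z))
        = (List.range m).map (fun i => if i < k then z.set (f i) 1 else z) := by
  intro k
  induction k with
  | zero => intro _; simp
  | succ k ih =>
    intro hk
    rw [List.range_succ, List.foldl_append, ih (by omega)]
    simp only [List.foldl_cons, List.foldl_nil]
    have hget : (((List.range m).map (fun i => if i < k then z.set (f i) 1 else z)).getD k [])
        = z := by
      rw [List.getD_eq_getElem _ _ (by simp; omega)]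
      simp
    rw [hget]
    apply List.ext_getElem
    · simp
    · intro i h1 h2
      simp only [List.length_set, List.length_map, List.length_range] at h1 h2
      rw [List.getElem_set]
      simp only [List.getElem_map, List.getElem_range]
      by_cases hik : i = k
      · simp [hik]
      · rw [if_neg (fun h => hik h.symm)]
        by_cases hik' : i < k
        · rw [if_pos hik', if_pos (by omega)]
        · rw [if_neg hik', if_neg (by omega)]

-- B's append-fold over range m is a map
theorem pvFoldAppend (m : Nat) (g : Nat → List Int) :
    ∀ (l : List Nat) (acc : List (List Int)),
      l.foldl (fun res i => res ++ [g i]) acc = acc ++ l.map g := by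
  intro l
  induction l with
  | nil => intro acc; simp
  | cons x l ih => intro acc; simp [ih]

-- ===== VERDICT (by name: the statement is the Claim_ definition above) =====
theorem get_minimum_in_row_mat_py_spec : Claim_equal_get_minimum_in_row_mat_py := by
  intro matrix hDom hPre
  obtain ⟨hne, hn1, hrows⟩ := hPre
  unfold Spec_get_minimum_in_row_mat_py
  unfold get_minimum_in_row_mat_py get_minimum_in_row_mat_py_alt
  simp only []
  set n := (PySem.List.pyGetD matrix (0 : Int) ([] : List Int)).length with hn
  have hhead : n = (matrix.headD []).length := by
    cases matrix with
    | nil => exact absurd rfl hne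
    | cons a t => simp [hn, PySem.List.pyGetD]
  -- A's side: the set-fold is a map of replicate-set rows
  have hA := pvFoldSet matrix.length (List.replicate n (0 : Int))
      (fun i => pvArgmin (PySem.List.pyGetD matrix (i : Int) []) n) matrix.length le_rfl
  rw [show (fun (acc : List (List Int)) (i : Nat) =>
        acc.set i ((acc.getD i []).set
          (pvArgmin (PySem.List.pyGetD matrix (i : Int) []) n) 1))
      = (fun acc (i : Nat) =>
          let row := PySem.List.pyGetD matrix (i : Int) []
          let min_j := (List.range n).foldl (fun (mj : Nat) (j : Nat) =>
            if PySem.List.pyGetD row (j : Int) 0 < PySem.List.pyGetD row (mj : Int) 0 then j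
            else mj) 0
          acc.set i ((acc.getD i []).set min_j 1)) from rfl] at hA
  rw [hA]
  -- B's side: the append-fold is a map
  rw [pvFoldAppend matrix.length
      (fun i =>
        (List.range n).map (fun k =>
          if k = (PySem.List.pyGet?
              (PySem.List.sorted (List.range n)
                (fun k' => PySem.List.pyGetD (PySem.List.pyGetD matrix (i : Int) []) (k' : Int) 0))
              (0 : Int)).getD 0
          then (1 : Int) else 0)) (List.range matrix.length) []]
  rw [List.nil_append]
  -- rows agree
  apply List.ext_getElem
  · simp
  · intro i h1 h2
    simp only [List.length_map, List.length_range] at h1 h2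
    simp only [List.getElem_map, List.getElem_range]
    obtain ⟨k, hk⟩ : ∃ k, n = k + 1 := by
      have : 1 ≤ n := by rw [hhead]; exact hn1
      exact ⟨n - 1, by omega⟩
    set row := PySem.List.pyGetD matrix (i : Int) [] with hrowdef
    set key : Nat → Int := fun k' => PySem.List.pyGetD row (k' : Int) 0 with hkey
    have hsne : PySem.List.sorted (List.range n) key ≠ [] := by
      rw [Ne, PySem.List.sorted_eq_nil_iff]
      intro h
      have := congrArg List.length h
      simp [hk] at this
    have hj : (PySem.List.pyGet? (PySem.List.sorted (List.range n) key) (0 : Int)).getD 0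
        = pvArgmin row n := by
      rw [pvPyGetZero _ hsne, hk, pvSortedRange_headD key k]
      rfl
    rw [if_pos h1, hj]
    exact pvReplicateSet n _ (pvArgmin_lt row n (by omega))
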